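-- pv_equiv track=rewrite | github.com/cauafsantosdev/Helsinki_Python | Part07/part07-17_string_helper/src/string_helper.py | change_case
-- ===== SOURCE A (Python) =====
-- import string
--
-- def change_case(orig_string: str):
--     orig_string = orig_string.split()
--     new_string = ""
--
--     for word in orig_string:
--         for letter in word:
--             if letter in string.ascii_lowercase:
--                 new_string += letter.upper()
--             elif letter in string.ascii_uppercase:
--                 new_string += letter.lower()
--         new_string += " "
--
--     return new_string.strip()
-- ===== SOURCE B (Python) =====
-- def change_case(orig_string: str):
--     out = []
--     in_word = False
--     for ch in orig_string:
--         if ch.isspace():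
--             if in_word:
--                 out.append(" ")
--                 in_word = False
--         else:
--             in_word = True
--             if "a" <= ch <= "z":
--                 out.append(ch.upper())
--             elif "A" <= ch <= "Z":
--                 out.append(ch.lower())
--     return "".join(out).strip(" ")
-- ===== Notes on version B (the rewrite author's own statement) =====
-- stated objective: alternative
-- what changed: Replaced split()-into-words followed by nested per-word loops with a single left-to-right pass over the raw characters driven by an in-word flag that emits one separator space per finished word, then strips edge spaces.
import Mathlib
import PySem

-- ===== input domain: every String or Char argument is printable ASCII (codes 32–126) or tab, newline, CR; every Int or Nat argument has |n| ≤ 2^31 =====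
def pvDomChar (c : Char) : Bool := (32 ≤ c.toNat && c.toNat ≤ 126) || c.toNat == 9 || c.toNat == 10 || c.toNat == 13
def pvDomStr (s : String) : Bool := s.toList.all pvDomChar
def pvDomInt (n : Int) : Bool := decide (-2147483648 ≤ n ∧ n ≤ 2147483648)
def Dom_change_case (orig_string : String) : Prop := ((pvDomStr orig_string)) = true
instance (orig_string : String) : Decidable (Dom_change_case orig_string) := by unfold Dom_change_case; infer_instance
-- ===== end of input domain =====

-- B replaces A's split()-then-nested-loops with a single left-to-right pass over the raw
-- characters driven by an in-word flag (objective: alternative decomposition, one pass,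
-- no intermediate word list); the two are proved to return the same string on all inputs.

-- ===== PORT A =====
def change_case (orig_string : String) : String :=
  let words := PySem.Str.split₀ orig_string
  let new_string : List Char :=
    words.foldl (fun ns word =>
      (word.toList.foldl (fun ns letter =>
        if PySem.Chars.isIn [letter] "abcdefghijklmnopqrstuvwxyz".toList then
          ns ++ [PySem.Chars.upperChar letter]
        else if PySem.Chars.isIn [letter] "ABCDEFGHIJKLMNOPQRSTUVWXYZ".toList then
          ns ++ [PySem.Chars.lowerChar letter]
        else ns) ns) ++ [' ']) []
  String.ofList (PySem.Chars.strip new_string)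

-- ===== PORT B =====
def change_case_alt (orig_string : String) : String :=
  let r := orig_string.toList.foldl (fun (st : List Char × Bool) ch =>
    if PySem.Chars.isspace ch then
      if st.2 then (st.1 ++ [' '], false) else st
    else
      if 'a' ≤ ch ∧ ch ≤ 'z' then (st.1 ++ [PySem.Chars.upperChar ch], true)
      else if 'A' ≤ ch ∧ ch ≤ 'Z' then (st.1 ++ [PySem.Chars.lowerChar ch], true)
      else (st.1, true)) ([], false)
  String.ofList (PySem.Chars.stripChars r.1 [' '])

-- ===== PRECONDITION & SPEC =====
def Spec_change_case (orig_string : String) (out : String) : Prop := out = change_case_alt orig_string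
instance (orig_string : String) (out : String) : Decidable (Spec_change_case orig_string out) := by unfold Spec_change_case; infer_instance

-- ===== CLAIM (what is proved, stated in full; the proofs are below) =====
def Claim_equal_change_case : Prop := ∀ (orig_string : String), Dom_change_case orig_string → Spec_change_case orig_string (change_case orig_string)

-- ===== LEMMAS AND PROOFS =====

/-- The case-swapped contribution of a single character. -/
def swapCh (c : Char) : List Char :=
  if 'a' ≤ c ∧ c ≤ 'z' then [PySem.Chars.upperChar c]
  else if 'A' ≤ c ∧ c ≤ 'Z' then [PySem.Chars.lowerChar c]
  else []

/-- B's loop body. -/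
def stepB (st : List Char × Bool) (ch : Char) : List Char × Bool :=
  if PySem.Chars.isspace ch then
    if st.2 then (st.1 ++ [' '], false) else st
  else
    if 'a' ≤ ch ∧ ch ≤ 'z' then (st.1 ++ [PySem.Chars.upperChar ch], true)
    else if 'A' ≤ ch ∧ ch ≤ 'Z' then (st.1 ++ [PySem.Chars.lowerChar ch], true)
    else (st.1, true)

/-- B's loop run from an empty buffer. -/
def outB (cs : List Char) (f : Bool) : List Char × Bool := cs.foldl stepB ([], f)

/-- A's joined string, as a function of the word list. -/
def gp (ws : List (List Char)) : List Char := ws.flatMap (fun w => w.flatMap swapCh ++ [' '])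

lemma mem_ascii_iff (c : Char) (n : Nat) (hv : n + 25 < 55296) :
    c ∈ (List.range' n 26).map Char.ofNat ↔ (n ≤ c.toNat ∧ c.toNat ≤ n + 25) := by
  simp only [List.mem_map, List.mem_range'_1]
  constructor
  · rintro ⟨k, ⟨hk1, hk2⟩, rfl⟩
    have hk : k.isValidChar := Or.inl (by omega)
    rw [Char.toNat_ofNat, if_pos hk]
    omega
  · rintro ⟨h1, h2⟩
    exact ⟨c.toNat, ⟨h1, by omega⟩, Char.ofNat_toNat c⟩

lemma isIn_singleton_iff (c : Char) (l : List Char) :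
    PySem.Chars.isIn [c] l = true ↔ c ∈ l := by
  rw [PySem.Chars.isIn_iff_infix]
  constructor
  · intro h; exact h.mem (by simp)
  · intro h
    obtain ⟨l₁, l₂, rfl⟩ := List.append_of_mem h
    exact ⟨l₁, l₂, by simp⟩

lemma le_char_iff (c d : Char) : c ≤ d ↔ c.toNat ≤ d.toNat := by
  rw [Char.le_def, UInt32.le_iff_toNat_le]; rfl

lemma isIn_lower (c : Char) :
    PySem.Chars.isIn [c] "abcdefghijklmnopqrstuvwxyz".toList = ('a' ≤ c ∧ c ≤ 'z' : Bool) := by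
  have h : "abcdefghijklmnopqrstuvwxyz".toList = (List.range' 97 26).map Char.ofNat := by decide
  apply Bool.eq_iff_iff.mpr
  rw [h, isIn_singleton_iff, mem_ascii_iff c 97 (by omega), decide_eq_true_iff,
    le_char_iff, le_char_iff]
  constructor <;> (intro h'; constructor <;> simp_all)

lemma isIn_upper (c : Char) :
    PySem.Chars.isIn [c] "ABCDEFGHIJKLMNOPQRSTUVWXYZ".toList = ('A' ≤ c ∧ c ≤ 'Z' : Bool) := by
  have h : "ABCDEFGHIJKLMNOPQRSTUVWXYZ".toList = (List.range' 65 26).map Char.ofNat := by decide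
  apply Bool.eq_iff_iff.mpr
  rw [h, isIn_singleton_iff, mem_ascii_iff c 65 (by omega), decide_eq_true_iff,
    le_char_iff, le_char_iff]
  constructor <;> (intro h'; constructor <;> simp_all)

/-- A's inner loop appends the swapped letters of the word. -/
lemma innerA (w : List Char) : ∀ ns : List Char,
    (w.foldl (fun ns letter =>
        if PySem.Chars.isIn [letter] "abcdefghijklmnopqrstuvwxyz".toList then
          ns ++ [PySem.Chars.upperChar letter]
        else if PySem.Chars.isIn [letter] "ABCDEFGHIJKLMNOPQRSTUVWXYZ".toList then
          ns ++ [PySem.Chars.lowerChar letter]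
        else ns) ns) = ns ++ w.flatMap swapCh := by
  induction w with
  | nil => simp
  | cons c w ih =>
    intro ns
    rw [List.foldl_cons, ih]
    simp only [isIn_lower, isIn_upper, swapCh, List.flatMap_cons]
    by_cases h1 : 'a' ≤ c ∧ c ≤ 'z' <;> by_cases h2 : 'A' ≤ c ∧ c ≤ 'Z' <;>
      simp [h1, h2]

/-- `stepB` from an arbitrary buffer only prepends that buffer. -/
lemma stepB_shift (buf : List Char) (f : Bool) (c : Char) :
    stepB (buf, f) c = (buf ++ (stepB ([], f) c).1, (stepB ([], f) c).2) := by
  unfold stepB; split_ifs <;> simp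

/-- Running B's loop from an arbitrary buffer only prepends that buffer. -/
lemma stepB_buffer (cs : List Char) : ∀ (buf : List Char) (f : Bool),
    cs.foldl stepB (buf, f) = (buf ++ (outB cs f).1, (outB cs f).2) := by
  induction cs with
  | nil => intro buf f; simp [outB]
  | cons c cs ih =>
    intro buf f
    simp only [outB, List.foldl_cons]
    rw [stepB_shift buf f c]
    rcases h : stepB ([], f) c with ⟨K, f'⟩
    simp only [ih]
    simp

/-- On a non-space character B's step appends `swapCh` and sets the flag. -/
lemma stepB_nonspace (buf : List Char) (f : Bool) (c : Char)
    (hs : PySem.Chars.isspace c = false) :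
    stepB (buf, f) c = (buf ++ swapCh c, true) := by
  unfold stepB swapCh
  rw [if_neg (by simp [hs])]
  split_ifs <;> simp

lemma gp_append (ws₁ ws₂ : List (List Char)) : gp (ws₁ ++ ws₂) = gp ws₁ ++ gp ws₂ := by
  simp [gp]

/-- Main correspondence: A's word list, joined, is B's buffer plus a trailing
    space exactly when the input ended inside a word. -/
lemma main_go (cs : List Char) : ∀ (cur : List Char) (acc : List (List Char)),
    gp (PySem.Chars.split₀.go cs cur acc) =
      gp acc.reverse ++ cur.reverse.flatMap swapCh ++ (outB cs (!cur.isEmpty)).1 ++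
        (if (outB cs (!cur.isEmpty)).2 then [' '] else []) := by
  induction cs with
  | nil =>
    intro cur acc
    rw [PySem.Chars.split₀.go]
    by_cases hc : cur.isEmpty <;> simp [hc, outB, gp]
    · simp [List.isEmpty_iff.mp hc]
  | cons c cs ih =>
    intro cur acc
    rw [PySem.Chars.split₀.go]
    by_cases hs : PySem.Chars.isspace c = true
    · rw [if_pos hs]
      by_cases hc : cur.isEmpty
      · rw [if_pos hc, ih [] acc]
        have : outB (c :: cs) (!cur.isEmpty) = outB cs false := by
          simp [outB, stepB, hs, hc]
        rw [this]
        simp [List.isEmpty_iff.mp hc]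
      · rw [if_neg hc, ih [] (cur.reverse :: acc)]
        have : outB (c :: cs) (!cur.isEmpty) =
            ([' '] ++ (outB cs false).1, (outB cs false).2) := by
          simp only [outB, List.foldl_cons, hc, Bool.not_false]
          rw [show stepB ([], true) c = ([' '], false) by simp [stepB, hs]]
          exact stepB_buffer cs [' '] false
        rw [this]
        show gp ((cur.reverse :: acc).reverse) ++ _ ++ _ ++ _ = _
        rw [show (cur.reverse :: acc).reverse = acc.reverse ++ [cur.reverse] by simp,
          gp_append]
        simp [gp]
    · rw [if_neg hs, ih (c :: cur) acc]
      have hs' : PySem.Chars.isspace c = false := by simpa using hs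
      have : outB (c :: cs) (!cur.isEmpty) = (swapCh c ++ (outB cs true).1, (outB cs true).2) := by
        simp only [outB, List.foldl_cons]
        rw [stepB_nonspace [] (!cur.isEmpty) c hs']
        exact stepB_buffer cs (swapCh c) true
      rw [this]
      simp

/-- Characters with code in [65,122] are not Python whitespace. -/
lemma char_notspace (e : Char) (h1 : 65 ≤ e.toNat) (h2 : e.toNat ≤ 122) :
    PySem.Chars.isspace e = (e == ' ') := by
  have hne : (e == ' ') = false := by
    simp only [beq_eq_false_iff_ne, ne_eq]
    intro hcon
    subst hcon
    have : (' ').toNat = 32 := rfl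
    omega
  rw [hne]
  simp only [PySem.Chars.isspace]
  simp only [Bool.or_eq_false_iff, Bool.and_eq_false_iff, decide_eq_false_iff_not]
  omega

lemma upperChar_toNat (d : Char) (h1 : 'a' ≤ d) (h2 : d ≤ 'z') :
    (PySem.Chars.upperChar d).toNat = d.toNat - 32 := by
  have hb2 : d.toNat ≤ 122 := (le_char_iff d 'z').mp h2
  have hlo : PySem.Chars.islower d = true := by
    simp only [PySem.Chars.islower, Bool.and_eq_true, decide_eq_true_eq]
    exact ⟨h1, h2⟩
  simp only [PySem.Chars.upperChar, hlo, if_true]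
  rw [Char.toNat_ofNat, if_pos (Or.inl (by omega))]

lemma lowerChar_toNat (d : Char) (h1 : 'A' ≤ d) (h2 : d ≤ 'Z') :
    (PySem.Chars.lowerChar d).toNat = d.toNat + 32 := by
  have hb2 : d.toNat ≤ 90 := (le_char_iff d 'Z').mp h2
  have hup : PySem.Chars.isupper d = true := by
    simp only [PySem.Chars.isupper, Bool.and_eq_true, decide_eq_true_eq]
    exact ⟨h1, h2⟩
  simp only [PySem.Chars.lowerChar, hup, if_true]
  rw [Char.toNat_ofNat, if_pos (Or.inl (by omega))]

/-- Every character B ever appends for a non-space input character is not whitespace. -/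
lemma swapCh_space (d c : Char) (h : c ∈ swapCh d) :
    PySem.Chars.isspace c = (c == ' ') := by
  unfold swapCh at h
  split_ifs at h with h1 h2
  · simp only [List.mem_singleton] at h; subst h
    have hb1 : 97 ≤ d.toNat := (le_char_iff 'a' d).mp h1.1
    have hb2 : d.toNat ≤ 122 := (le_char_iff d 'z').mp h1.2
    have ht := upperChar_toNat d h1.1 h1.2
    exact char_notspace _ (by omega) (by omega)
  · simp only [List.mem_singleton] at h; subst h
    have hb1 : 65 ≤ d.toNat := (le_char_iff 'A' d).mp h2.1
    have hb2 : d.toNat ≤ 90 := (le_char_iff d 'Z').mp h2.2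
    have ht := lowerChar_toNat d h2.1 h2.2
    exact char_notspace _ (by omega) (by omega)
  · simp at h

/-- Every character in B's buffer satisfies: it is whitespace iff it is `' '`. -/
lemma outB_space (cs : List Char) : ∀ (f : Bool), ∀ c ∈ (outB cs f).1,
    PySem.Chars.isspace c = (c == ' ') := by
  induction cs with
  | nil => intro f c hc; simp [outB] at hc
  | cons d cs ih =>
    intro f c hc
    simp only [outB, List.foldl_cons] at hc
    by_cases hs : PySem.Chars.isspace d = true
    · cases f
      · rw [show stepB ([], false) d = ([], false) by simp [stepB, hs]] at hc
        exact ih false c hc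
      · rw [show stepB ([], true) d = ([' '], false) by simp [stepB, hs],
          stepB_buffer cs [' '] false] at hc
        simp only [List.mem_append, List.mem_singleton] at hc
        rcases hc with rfl | hc
        · simp [PySem.Chars.isspace, Char.toNat]
        · exact ih false c hc
    · rw [stepB_nonspace [] f d (by simpa using hs)] at hc
      simp only [List.nil_append] at hc
      rw [stepB_buffer cs (swapCh d) true] at hc
      simp only [List.mem_append] at hc
      rcases hc with hc | hc
      · exact swapCh_space d c hc
      · exact ih true c hc

lemma dropWhile_congr' {α : Type} (p q : α → Bool) (l : List α)
    (h : ∀ a ∈ l, p a = q a) : l.dropWhile p = l.dropWhile q := by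
  induction l with
  | nil => rfl
  | cons a l ih =>
    simp only [List.dropWhile_cons]
    rw [h a (by simp)]
    split_ifs with hq
    · exact ih (fun a ha => h a (by simp [ha]))
    · rfl

/-- Stripping whitespace from B's buffer plus an optional trailing space equals
    stripping spaces from B's buffer. -/
lemma strip_eq (x : List Char) (t : Bool)
    (hx : ∀ c ∈ x, PySem.Chars.isspace c = (c == ' ')) :
    PySem.Chars.strip (x ++ (if t then [' '] else [])) = PySem.Chars.stripChars x [' '] := by
  have hcontains : ∀ c : Char, ([' '].contains c) = (c == ' ') := by
    intro c; simp only [List.contains_cons, List.contains_nil, Bool.or_false]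
  set p : Char → Bool := fun c => c == ' ' with hp
  have hstripChars : PySem.Chars.stripChars x [' '] =
      ((x.dropWhile p).reverse.dropWhile p).reverse := by
    simp only [PySem.Chars.stripChars]
    rw [dropWhile_congr' _ p x (fun a _ => hcontains a),
      dropWhile_congr' _ p _ (fun a _ => hcontains a)]
  have hy : ∀ c ∈ x ++ (if t then [' '] else []), PySem.Chars.isspace c = p c := by
    intro c hc
    simp only [List.mem_append] at hc
    rcases hc with hc | hc
    · exact hx c hc
    · have : c = ' ' := by cases t <;> simp_all
      subst this; simp [PySem.Chars.isspace, Char.toNat, hp]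
  have hstrip : PySem.Chars.strip (x ++ (if t then [' '] else [])) =
      (((x ++ (if t then [' '] else [])).dropWhile p).reverse.dropWhile p).reverse := by
    simp only [PySem.Chars.strip, PySem.Chars.lstrip, PySem.Chars.rstrip]
    rw [dropWhile_congr' _ p _ hy]
    congr 1
    apply dropWhile_congr'
    intro a ha
    exact hy a (List.mem_reverse.mp ha |> List.dropWhile_subset _)
  rw [hstrip, hstripChars]
  cases t
  · simp
  · simp only [if_pos]
    rw [List.dropWhile_append]
    split_ifs with h
    · have hx0 : List.dropWhile p x = [] := List.isEmpty_iff.mp h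
      rw [hx0, List.dropWhile_cons_of_pos (by simp [hp])]
      simp
    · simp only [List.reverse_append, List.reverse_cons, List.reverse_nil, List.nil_append]
      show (List.dropWhile p (' ' :: _)).reverse = _
      rw [List.dropWhile_cons_of_pos (by simp [hp])]
      simp

/-- A's whole computation equals `gp` of the split word list. -/
lemma changeA_eq (s : String) :
    change_case s = String.ofList (PySem.Chars.strip (gp (PySem.Chars.split₀ s.toList))) := by
  unfold change_case
  dsimp only
  congr 1
  congr 1
  have hbody : ∀ (ns : List Char) (word : String),
      (word.toList.foldl (fun ns letter =>
        if PySem.Chars.isIn [letter] "abcdefghijklmnopqrstuvwxyz".toList then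
          ns ++ [PySem.Chars.upperChar letter]
        else if PySem.Chars.isIn [letter] "ABCDEFGHIJKLMNOPQRSTUVWXYZ".toList then
          ns ++ [PySem.Chars.lowerChar letter]
        else ns) ns) ++ [' '] = ns ++ (word.toList.flatMap swapCh ++ [' ']) := by
    intro ns word; rw [innerA]; simp
  have hfun : (fun (ns : List Char) (word : String) =>
      (word.toList.foldl (fun ns letter =>
        if PySem.Chars.isIn [letter] "abcdefghijklmnopqrstuvwxyz".toList then
          ns ++ [PySem.Chars.upperChar letter]
        else if PySem.Chars.isIn [letter] "ABCDEFGHIJKLMNOPQRSTUVWXYZ".toList then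
          ns ++ [PySem.Chars.lowerChar letter]
        else ns) ns) ++ [' ']) =
      (fun ns word => ns ++ (word.toList.flatMap swapCh ++ [' '])) := by
    funext ns word; exact hbody ns word
  calc (PySem.Str.split₀ s).foldl _ [] =
      (PySem.Str.split₀ s).foldl
        (fun ns word => ns ++ (word.toList.flatMap swapCh ++ [' '])) [] := by
        rw [hfun]
    _ = (PySem.Str.split₀ s).flatMap (fun word => word.toList.flatMap swapCh ++ [' ']) := by
        rw [PySem.List.foldl_append_eq_flatMap]; simp
    _ = gp (PySem.Chars.split₀ s.toList) := by
        rw [← PySem.Str.split₀_map_toList s]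
        unfold gp
        rw [List.flatMap_map]

-- ===== VERDICT (by name: the statement is the Claim_ definition above) =====
theorem change_case_spec : Claim_equal_change_case := by
  intro s _
  unfold Spec_change_case
  rw [changeA_eq s]
  unfold change_case_alt
  have halt : (s.toList.foldl (fun (st : List Char × Bool) ch =>
      if PySem.Chars.isspace ch then
        if st.2 then (st.1 ++ [' '], false) else st
      else
        if 'a' ≤ ch ∧ ch ≤ 'z' then (st.1 ++ [PySem.Chars.upperChar ch], true)
        else if 'A' ≤ ch ∧ ch ≤ 'Z' then (st.1 ++ [PySem.Chars.lowerChar ch], true)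
        else (st.1, true)) ([], false)) = outB s.toList false := rfl
  rw [halt]
  have hsplit : PySem.Chars.split₀ s.toList = PySem.Chars.split₀.go s.toList [] [] := rfl
  rw [hsplit, main_go s.toList [] []]
  simp only [List.reverse_nil, List.isEmpty_nil, Bool.not_true, gp, List.flatMap_nil,
    List.nil_append]
  congr 1
  exact strip_eq _ _ (outB_space s.toList false)
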